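-- pv_equiv track=rewrite | github.com/DTC04/Lab1-Cripto | mitm_decoder.py | evaluar_opciones
-- ===== SOURCE A (Python) =====
-- import string
--
-- def evaluar_opciones(opciones):
--     """
--     Devuelve la opción más probable usando múltiples criterios de evaluación.
--     """
--     def score(text):
--         # Contar letras y espacios
--         letras_espacios = sum(c in string.ascii_letters + " ñÑ" for c in text)
--
--         # Bonus por palabras comunes en español
--         palabras_comunes = ['el', 'la', 'de', 'que', 'y', 'a', 'en', 'un', 'es', 'se', 'no', 'te', 'lo', 'le', 'da', 'su', 'por', 'son', 'con', 'para', 'al', 'del', 'los', 'las', 'una', 'como', 'más', 'pero', 'sus', 'me', 'hasta', 'hay', 'donde', 'han', 'quien', 'están', 'estado', 'desde', 'todo', 'nos', 'durante', 'todos', 'uno', 'les', 'ni', 'contra', 'otros', 'ese', 'eso', 'ante', 'ellos', 'e', 'esto', 'mí', 'antes', 'algunos', 'qué', 'unos', 'yo', 'otro', 'otras', 'otra', 'él', 'tanto', 'esa', 'estos', 'mucho', 'quienes', 'nada', 'muchos', 'cual', 'poco', 'ella', 'estar', 'estas', 'algunas', 'algo', 'nosotros']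
--
--         palabras_texto = text.lower().split()
--         palabras_encontradas = sum(1 for palabra in palabras_texto if palabra in palabras_comunes)
--
--         # Penalizar caracteres extraños
--         caracteres_raros = sum(1 for c in text if c not in string.ascii_letters + string.digits + " ñÑ.,!?¿¡()[]{}:;\"'")
--
--         # Penalizar secuencias de caracteres repetidos
--         repeticiones = sum(1 for i in range(len(text)-1) if text[i] == text[i+1] and text[i] not in "aeiou")
--
--         # Calcular puntuación final
--         puntuacion = letras_espacios + (palabras_encontradas * 3) - (caracteres_raros * 2) - (repeticiones * 1)
--
--         return puntuacion
--
--     return max(opciones, key=lambda x: score(x[1]))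
-- ===== SOURCE B (Python) =====
-- import string
--
-- _COMMON = ['el', 'la', 'de', 'que', 'y', 'a', 'en', 'un', 'es', 'se', 'no', 'te', 'lo', 'le', 'da', 'su', 'por', 'son', 'con', 'para', 'al', 'del', 'los', 'las', 'una', 'como', 'más', 'pero', 'sus', 'me', 'hasta', 'hay', 'donde', 'han', 'quien', 'están', 'estado', 'desde', 'todo', 'nos', 'durante', 'todos', 'uno', 'les', 'ni', 'contra', 'otros', 'ese', 'eso', 'ante', 'ellos', 'e', 'esto', 'mí', 'antes', 'algunos', 'qué', 'unos', 'yo', 'otro', 'otras', 'otra', 'él', 'tanto', 'esa', 'estos', 'mucho', 'quienes', 'nada', 'muchos', 'cual', 'poco', 'ella', 'estar', 'estas', 'algunas', 'algo', 'nosotros']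
-- _LETRAS = string.ascii_letters + " ñÑ"
-- _ALLOWED = string.ascii_letters + string.digits + " ñÑ.,!?¿¡()[]{}:;\"'"
--
--
-- def _weight(c):
--     # fused per-character weight: +1 letter/space, 0 other allowed, -2 rare
--     if c in _LETRAS:
--         return 1
--     if c in _ALLOWED:
--         return 0
--     return -2
--
--
-- def _score(text):
--     # run-length scan: one pass over maximal runs of equal characters
--     total = 0
--     i, n = 0, len(text)
--     while i < n:
--         c = text[i]
--         j = i + 1
--         while j < n and text[j] == c:
--             j += 1
--         run = j - i
--         total += run * _weight(c)
--         if c not in "aeiou":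
--             total -= run - 1
--         i = j
--     # word bonus: iterate the dictionary, count occurrences of each entry
--     words = text.lower().split()
--     for w in _COMMON:
--         total += 3 * words.count(w)
--     return total
--
--
-- def evaluar_opciones(opciones):
--     mejor = opciones[0]
--     mejor_s = _score(mejor[1])
--     for cand in opciones[1:]:
--         s = _score(cand[1])
--         if s > mejor_s:
--             mejor, mejor_s = cand, s
--     return mejor
-- ===== Notes on version B (the rewrite author's own statement) =====
-- stated objective: faster
-- what changed: B scores a text by a run-length scan over maximal runs of equal characters with a fused per-character weight (+1 letter/space, 0 allowed, -2 rare; run-1 repetition penalty per non-vowel run), gets the word bonus by iterating the common-word dictionary and counting each entry's occurrences instead of testing membership of each text word against a 76-entry list, and selects the winner with an explicit first-max loop caching each score instead of max(key=...).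
import Mathlib
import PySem

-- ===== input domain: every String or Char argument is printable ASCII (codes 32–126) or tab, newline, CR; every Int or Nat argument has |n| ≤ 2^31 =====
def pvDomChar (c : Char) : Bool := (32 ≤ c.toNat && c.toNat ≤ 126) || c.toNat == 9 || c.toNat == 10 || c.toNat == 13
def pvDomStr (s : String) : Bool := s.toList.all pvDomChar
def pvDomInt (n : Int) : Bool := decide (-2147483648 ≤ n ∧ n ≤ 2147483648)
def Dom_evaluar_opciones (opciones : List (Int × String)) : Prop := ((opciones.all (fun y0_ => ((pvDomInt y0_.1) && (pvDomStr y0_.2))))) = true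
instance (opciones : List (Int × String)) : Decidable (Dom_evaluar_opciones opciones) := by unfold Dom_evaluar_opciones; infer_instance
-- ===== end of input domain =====

-- B re-scores each option by a run-length scan over maximal runs of equal characters with a fused
-- per-character weight (+1 letter/space, 0 allowed, -2 rare; run-1 repetition penalty per non-vowel
-- run), gets the word bonus by iterating the common-word list and counting each entry's occurrences,
-- and selects the winner with an explicit first-max loop; same return value on every non-empty list.


-- shared data constants (literal copies of the Python string/word constants)
def pvLetras : List Char := "abcdefghijklmnopqrstuvwxyzABCDEFGHIJKLMNOPQRSTUVWXYZ ñÑ".toList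
def pvPermitidos : List Char := "abcdefghijklmnopqrstuvwxyzABCDEFGHIJKLMNOPQRSTUVWXYZ0123456789 ñÑ.,!?¿¡()[]{}:;\"'".toList
def pvVocales : List Char := "aeiou".toList
def pvPalabrasComunes : List (List Char) := (["el", "la", "de", "que", "y", "a", "en", "un", "es", "se", "no", "te", "lo", "le", "da", "su", "por", "son", "con", "para", "al", "del", "los", "las", "una", "como", "más", "pero", "sus", "me", "hasta", "hay", "donde", "han", "quien", "están", "estado", "desde", "todo", "nos", "durante", "todos", "uno", "les", "ni", "contra", "otros", "ese", "eso", "ante", "ellos", "e", "esto", "mí", "antes", "algunos", "qué", "unos", "yo", "otro", "otras", "otra", "él", "tanto", "esa", "estos", "mucho", "quienes", "nada", "muchos", "cual", "poco", "ella", "estar", "estas", "algunas", "algo", "nosotros"]).map String.toList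

-- ===== PORT A =====
-- score(text): four separate scans (count, word count, count, index-based range pass)
def pvScoreA (text : String) : Int :=
  let cs := text.toList
  let letras_espacios : Int := (cs.countP (fun c => c ∈ pvLetras) : Nat)
  let palabras_encontradas : Int :=
    ((PySem.Chars.split₀ (PySem.Chars.lower cs)).countP (fun w => w ∈ pvPalabrasComunes) : Nat)
  let caracteres_raros : Int := (cs.countP (fun c => c ∉ pvPermitidos) : Nat)
  let repeticiones : Int :=
    (PySem.List.pyRange 0 (PySem.List.len cs - 1) 1).foldl
      (fun acc i =>
        if PySem.List.pyGetD cs i ' ' = PySem.List.pyGetD cs (i + 1) ' '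
            ∧ PySem.List.pyGetD cs i ' ' ∉ pvVocales then acc + 1 else acc) 0
  letras_espacios + (palabras_encontradas * 3) - (caracteres_raros * 2) - (repeticiones * 1)

def evaluar_opciones (opciones : List (Int × String)) : Int × String :=
  (PySem.List.max? opciones (fun x => pvScoreA x.2)).getD (0, "")

-- ===== PORT B =====
-- _weight(c): fused per-character weight
def pvWeight (c : Char) : Int :=
  if c ∈ pvLetras then 1 else if c ∈ pvPermitidos then 0 else -2

-- _score's while loop: recursion over maximal runs of equal characters
def pvScoreRLE : List Char → Int
  | [] => 0
  | c :: t =>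
    let run : Int := ((t.takeWhile (fun d => d = c)).length : Int) + 1
    (run * pvWeight c - (if c ∉ pvVocales then run - 1 else 0))
      + pvScoreRLE (t.dropWhile (fun d => d = c))
  termination_by cs => cs.length
  decreasing_by
    simp only [List.length_cons]
    exact Nat.lt_succ_of_le (List.length_dropWhile_le _ t)

def pvScoreB (text : String) : Int :=
  let base := pvScoreRLE text.toList
  let words := PySem.Chars.split₀ (PySem.Chars.lower text.toList)
  pvPalabrasComunes.foldl (fun acc w => acc + 3 * (PySem.List.count words w : Int)) base

def evaluar_opciones_alt (opciones : List (Int × String)) : Int × String :=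
  match opciones with
  | [] => (0, "")
  | mejor :: rest =>
    (rest.foldl
      (fun acc cand =>
        let s := pvScoreB cand.2
        if acc.2 < s then (cand, s) else acc)
      (mejor, pvScoreB mejor.2)).1

-- ===== PRECONDITION & SPEC =====
-- Python's max (A) raises ValueError on an empty list (and B's opciones[0] raises IndexError):
-- Pre_ excludes exactly the empty list.
def Pre_evaluar_opciones (opciones : List (Int × String)) : Prop := opciones ≠ []
instance (opciones : List (Int × String)) : Decidable (Pre_evaluar_opciones opciones) := by unfold Pre_evaluar_opciones; infer_instance
def pvWitness_evaluar_opciones : (List (Int × String)) := [(1, "hola que tal"), (2, "x@#z")]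
def Spec_evaluar_opciones (opciones : List (Int × String)) (out : Int × String) : Prop := out = evaluar_opciones_alt opciones
instance (opciones : List (Int × String)) (out : Int × String) : Decidable (Spec_evaluar_opciones opciones out) := by unfold Spec_evaluar_opciones; infer_instance

-- ===== CLAIM (what is proved, stated in full; the proofs are below) =====
def Claim_equal_evaluar_opciones : Prop := ∀ (opciones : List (Int × String)), Dom_evaluar_opciones opciones → Pre_evaluar_opciones opciones → Spec_evaluar_opciones opciones (evaluar_opciones opciones)

-- ===== LEMMAS AND PROOFS =====

-- every letter/space character is also an allowed character
theorem pvLetras_subset {c : Char} (h : c ∈ pvLetras) : c ∈ pvPermitidos := by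
  have hall : pvLetras.all (fun c => decide (c ∈ pvPermitidos)) = true := by decide
  simpa using List.all_eq_true.mp hall c h

-- the two A-side counts collapse to the summed fused weight
theorem pvWsum (cs : List Char) :
    (cs.map pvWeight).sum
      = ((cs.countP (fun c => c ∈ pvLetras) : Nat) : Int)
        - 2 * ((cs.countP (fun c => c ∉ pvPermitidos) : Nat) : Int) := by
  induction cs with
  | nil => simp
  | cons c t ih =>
    simp only [List.map_cons, List.sum_cons, List.countP_cons, ih, pvWeight]
    by_cases hL : c ∈ pvLetras
    · have hP : c ∈ pvPermitidos := pvLetras_subset hL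
      simp [hL, hP]; ring
    · by_cases hP : c ∈ pvPermitidos
      · simp [hL, hP]
      · simp [hL, hP]; ring

-- adjacent repetitions counted pairwise (A's orientation)
def pvRepAdj : List Char → Int
  | [] => 0
  | [_] => 0
  | a :: b :: t => (if a = b ∧ a ∉ pvVocales then 1 else 0) + pvRepAdj (b :: t)

theorem pvRangeFold (cs : List Char) (r : Int) :
    (List.range (cs.length - 1)).foldl
      (fun acc k =>
        if cs.getD k ' ' = cs.getD (k + 1) ' ' ∧ cs.getD k ' ' ∉ pvVocales then acc + 1 else acc) r
    = r + pvRepAdj cs := by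
  induction cs generalizing r with
  | nil => simp [pvRepAdj]
  | cons a t ih =>
    cases t with
    | nil => simp [pvRepAdj]
    | cons b t' =>
      have hlen : (a :: b :: t').length - 1 = (b :: t').length := rfl
      rw [hlen, show (b :: t').length = t'.length + 1 from rfl, List.range_succ_eq_map,
        List.foldl_cons, List.foldl_map]
      have hstep :
          (fun (acc : Int) (k : Nat) =>
            if (a :: b :: t').getD k.succ ' ' = (a :: b :: t').getD (k.succ + 1) ' '
                ∧ (a :: b :: t').getD k.succ ' ' ∉ pvVocales then acc + 1 else acc)
          = (fun (acc : Int) (k : Nat) =>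
            if (b :: t').getD k ' ' = (b :: t').getD (k + 1) ' '
                ∧ (b :: t').getD k ' ' ∉ pvVocales then acc + 1 else acc) := by
        funext acc k
        simp [Nat.succ_eq_add_one]
      rw [hstep]
      have := ih (r := if (a :: b :: t').getD 0 ' ' = (a :: b :: t').getD (0 + 1) ' '
          ∧ (a :: b :: t').getD 0 ' ' ∉ pvVocales then r + 1 else r)
      rw [show (b :: t').length - 1 = t'.length from rfl] at this
      rw [this]
      simp only [pvRepAdj, List.getD_cons_zero, List.getD_cons_succ]
      split_ifs <;> ring

theorem pvRepsA (cs : List Char) :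
    (PySem.List.pyRange 0 (PySem.List.len cs - 1) 1).foldl
      (fun acc i =>
        if PySem.List.pyGetD cs i ' ' = PySem.List.pyGetD cs (i + 1) ' '
            ∧ PySem.List.pyGetD cs i ' ' ∉ pvVocales then acc + 1 else acc) 0
    = pvRepAdj cs := by
  cases cs with
  | nil => rfl
  | cons a t =>
    have hlen : PySem.List.len (a :: t) - 1 = (((a :: t).length - 1 : Nat) : Int) := by
      simp [PySem.List.len_eq]
    rw [hlen, PySem.List.pyRange_zero_natCast, List.foldl_map]
    have hstep :
        (fun (acc : Int) (k : Nat) =>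
          if PySem.List.pyGetD (a :: t) (↑k) ' ' = PySem.List.pyGetD (a :: t) (↑k + 1) ' '
              ∧ PySem.List.pyGetD (a :: t) (↑k) ' ' ∉ pvVocales then acc + 1 else acc)
        = (fun (acc : Int) (k : Nat) =>
          if (a :: t).getD k ' ' = (a :: t).getD (k + 1) ' '
              ∧ (a :: t).getD k ' ' ∉ pvVocales then acc + 1 else acc) := by
      funext acc k
      rw [show ((k : Int) + 1) = ((k + 1 : Nat) : Int) by push_cast; ring]
      simp only [PySem.List.pyGetD_natCast]
    rw [hstep]
    simpa using pvRangeFold (a :: t) 0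

-- pairwise repetitions of a run of n+1 equal characters followed by a block not starting with c
theorem pvRepAdj_run (n : Nat) (c : Char) (rest : List Char)
    (h : rest.head? ≠ some c) :
    pvRepAdj (List.replicate (n + 1) c ++ rest)
      = (if c ∉ pvVocales then (n : Int) else 0) + pvRepAdj rest := by
  induction n with
  | zero =>
    cases rest with
    | nil => simp [pvRepAdj]
    | cons d t =>
      have hdc : ¬ (c = d) := by
        intro hcd; exact h (by simp [hcd])
      simp [pvRepAdj, hdc]
  | succ m ih =>
    have : List.replicate (m + 2) c ++ rest
        = c :: c :: (List.replicate m c ++ rest) := by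
      simp [List.replicate_succ]
    rw [this]
    have hrec : c :: (List.replicate m c ++ rest) = List.replicate (m + 1) c ++ rest := by
      simp [List.replicate_succ]
    show (if c = c ∧ c ∉ pvVocales then 1 else 0)
        + pvRepAdj (c :: (List.replicate m c ++ rest)) = _
    rw [hrec, ih]
    by_cases hv : c ∉ pvVocales
    · simp [hv]; ring
    · simp [hv]

-- the run-length scan equals summed weights minus pairwise repetitions
theorem pvScoreRLE_eq (cs : List Char) :
    pvScoreRLE cs = (cs.map pvWeight).sum - pvRepAdj cs := by
  induction hn : cs.length using Nat.strong_induction_on generalizing cs with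
  | _ n ih =>
    cases cs with
    | nil => rw [pvScoreRLE]; simp [pvRepAdj]
    | cons c t =>
      set k := (t.takeWhile (fun d => d = c)).length with hk
      have htw : t.takeWhile (fun d => d = c) = List.replicate k c := by
        rw [List.eq_replicate_iff]
        exact ⟨rfl, fun b hb => by simpa using List.mem_takeWhile_imp hb⟩
      have hsplit : c :: t = List.replicate (k + 1) c ++ t.dropWhile (fun d => d = c) := by
        conv_lhs => rw [← List.takeWhile_append_dropWhile (p := fun d => decide (d = c)) (l := t)]
        rw [show (List.takeWhile (fun d => decide (d = c)) t) = List.replicate k c from htw]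
        simp [List.replicate_succ]
      have hhead : (t.dropWhile (fun d => d = c)).head? ≠ some c := by
        intro hcon
        have := List.head?_dropWhile_not (p := fun d => decide (d = c)) (l := t)
        rw [hcon] at this
        simp at this
      have hlt : (t.dropWhile (fun d => d = c)).length < n := by
        subst hn
        exact Nat.lt_succ_of_le (List.length_dropWhile_le _ t)
      have hihr := ih _ hlt (t.dropWhile (fun d => d = c)) rfl
      rw [pvScoreRLE]
      show (((k : Int) + 1) * pvWeight c - (if c ∉ pvVocales then (k : Int) + 1 - 1 else 0))
          + pvScoreRLE (t.dropWhile (fun d => d = c)) = _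
      rw [hihr]
      conv_rhs => rw [hsplit]
      rw [pvRepAdj_run k c _ hhead]
      rw [List.map_append, List.sum_append, List.map_replicate, List.sum_replicate]
      simp only [nsmul_eq_mul]
      by_cases hv : c ∉ pvVocales
      · simp only [hv]; push_cast; ring_nf
      · simp only [hv, if_false]; push_cast; ring

-- summing each dictionary word's occurrence count equals counting matching words (dictionary nodup)
theorem pvCountSwap (P : List (List Char)) (hP : P.Nodup) (ws : List (List Char)) :
    (P.map (fun w => ((ws.count w : Nat) : Int))).sum
      = ((ws.countP (fun w => w ∈ P) : Nat) : Int) := by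
  induction ws with
  | nil => simp
  | cons v t ih =>
    have hcount : ∀ w : List Char, ((v :: t).count w : Int)
        = (t.count w : Int) + (if w = v then 1 else 0) := by
      intro w
      by_cases h : w = v
      · subst h; simp
      · have h' : ¬ v = w := fun hh => h hh.symm
        simp [h, h']
    have hmap : (P.map (fun w => (((v :: t).count w : Nat) : Int))).sum
        = (P.map (fun w => ((t.count w : Nat) : Int))).sum
          + (P.map (fun w => if w = v then (1 : Int) else 0)).sum := by
      rw [show (fun w : List Char => (((v :: t).count w : Nat) : Int))
          = fun w => ((t.count w : Nat) : Int) + (if w = v then 1 else 0) from funext hcount]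
      exact PySem.List.sum_map_add_int P _ _
    have hind : (P.map (fun w => if w = v then (1 : Int) else 0)).sum
        = if v ∈ P then 1 else 0 := by
      clear hmap hcount ih
      induction P with
      | nil => simp
      | cons q Q ihq =>
        rcases List.nodup_cons.mp hP with ⟨hq, hQ'⟩
        by_cases h : q = v
        · subst h
          simp [ihq hQ', hq]
        · have h' : ¬ v = q := fun hh => h hh.symm
          simp [h, h', ihq hQ']
    rw [hmap, ih, hind, List.countP_cons]
    by_cases hv : v ∈ P <;> simp [hv]

theorem pvPalabras_nodup : pvPalabrasComunes.Nodup := by decide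

-- the two score functions agree on every string
theorem pvScore_eq (text : String) : pvScoreA text = pvScoreB text := by
  simp only [pvScoreA, pvScoreB]
  rw [pvRepsA]
  rw [show (fun (acc : Int) (w : List Char) => acc + 3 * (PySem.List.count
        (PySem.Chars.split₀ (PySem.Chars.lower text.toList)) w : Int))
      = (fun (acc : Int) (w : List Char) => acc + (fun w => 3 * (PySem.List.count
        (PySem.Chars.split₀ (PySem.Chars.lower text.toList)) w : Int)) w) from rfl]
  rw [PySem.List.foldl_add]
  rw [pvScoreRLE_eq, pvWsum]
  have h3 : (pvPalabrasComunes.map (fun w => 3 * (PySem.List.count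
      (PySem.Chars.split₀ (PySem.Chars.lower text.toList)) w : Int))).sum
      = 3 * ((PySem.Chars.split₀ (PySem.Chars.lower text.toList)).countP
          (fun w => w ∈ pvPalabrasComunes) : Int) := by
    have hcnt : (fun w => 3 * (PySem.List.count
        (PySem.Chars.split₀ (PySem.Chars.lower text.toList)) w : Int))
        = fun w => 3 * ((((PySem.Chars.split₀ (PySem.Chars.lower text.toList)).count w : Nat)) : Int) := by
      funext w
      simp [PySem.List.count_eq]
    rw [hcnt, List.sum_map_mul_left,
      pvCountSwap pvPalabrasComunes pvPalabras_nodup]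
  rw [h3]
  ring

-- B's explicit first-max loop computes A's max?-selection (shared score function)
theorem pvSelB (t : List (Int × String)) (m : Int × String) :
    t.foldl
      (fun acc x =>
        match acc with
        | none => some x
        | some mm => if pvScoreB mm.2 < pvScoreB x.2 then some x else some mm)
      (some m)
    = some ((t.foldl
        (fun acc cand =>
          let s := pvScoreB cand.2
          if acc.2 < s then (cand, s) else acc)
        (m, pvScoreB m.2)).1) := by
  induction t generalizing m with
  | nil => simp
  | cons x t ih =>
    simp only [List.foldl]
    by_cases h : pvScoreB m.2 < pvScoreB x.2
    · simpa only [h, if_true] using ih x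
    · simpa only [h, if_false] using ih m

theorem pvSel (t : List (Int × String)) (m : Int × String) :
    t.foldl
      (fun acc x =>
        match acc with
        | none => some x
        | some mm => if pvScoreA mm.2 < pvScoreA x.2 then some x else some mm)
      (some m)
    = some ((t.foldl
        (fun acc cand =>
          let s := pvScoreB cand.2
          if acc.2 < s then (cand, s) else acc)
        (m, pvScoreB m.2)).1) := by
  simpa only [pvScore_eq] using pvSelB t m

-- ===== VERDICT (by name: the statement is the Claim_ definition above) =====
theorem evaluar_opciones_spec : Claim_equal_evaluar_opciones := by
  intro opciones _ hpre
  unfold Spec_evaluar_opciones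
  cases opciones with
  | nil => exact absurd rfl hpre
  | cons x t =>
    show (PySem.List.max? (x :: t) (fun y => pvScoreA y.2)).getD (0, "") = _
    have h1 : PySem.List.max? (x :: t) (fun y => pvScoreA y.2)
        = t.foldl
            (fun acc y =>
              match acc with
              | none => some y
              | some mm => if pvScoreA mm.2 < pvScoreA y.2 then some y else some mm)
            (some x) := by
      simp only [PySem.List.max?, List.foldl]
      congr 1
      funext acc y
      cases acc <;> rfl
    rw [h1, pvSel]
    rfl
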